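-- pv_equiv track=rewrite | github.com/IlyaGusev/rudetox | rudetox/marker/util.py | choose_best_records
-- ===== SOURCE A (Python) =====
-- from collections import defaultdict
--
-- def choose_best_records(records):
--     grouped_records = defaultdict(list)
--     for r in records:
--         grouped_records[r["orig_source"]].append(r)
--     filtered_records = []
--     for source, records in grouped_records.items():
--         records = [(r["target"].count("extra_id"), r) for r in records]
--         best_record = min(records, key=lambda x: x[0])
--         filtered_records.append(best_record[1])
--     return filtered_records
-- ===== SOURCE B (Python) =====
-- def choose_best_records(records):
--     best = {}
--     for r in records:
--         c = r["target"].count("extra_id")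
--         src = r["orig_source"]
--         cur = best.get(src)
--         if cur is None or c < cur[0]:
--             best[src] = (c, r)
--     return [rec for _, rec in best.values()]
-- ===== Notes on version B (the rewrite author's own statement) =====
-- stated objective: simpler
-- what changed: Single pass keeping one (best_count, best_record) per source in a dict, instead of building full per-source group lists and then running min over each group.
import Mathlib
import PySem

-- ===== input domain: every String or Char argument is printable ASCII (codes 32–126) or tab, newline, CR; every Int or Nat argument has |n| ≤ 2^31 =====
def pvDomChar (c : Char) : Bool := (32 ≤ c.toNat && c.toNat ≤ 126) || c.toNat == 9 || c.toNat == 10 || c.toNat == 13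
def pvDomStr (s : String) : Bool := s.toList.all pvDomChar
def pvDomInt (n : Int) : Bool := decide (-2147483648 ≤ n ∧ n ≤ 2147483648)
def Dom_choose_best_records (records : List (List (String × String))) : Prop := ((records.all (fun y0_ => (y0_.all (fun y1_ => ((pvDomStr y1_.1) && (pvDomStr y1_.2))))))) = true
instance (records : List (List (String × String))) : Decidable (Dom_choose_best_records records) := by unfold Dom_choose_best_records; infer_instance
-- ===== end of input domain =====

-- B replaces A's group-then-min (full per-source lists, then min over each group) by a single
-- pass keeping only the current best (count, record) per source; same return value, simpler state.

-- r[k] for a record r (a Python dict); exact whenever k is a key of r, which Pre_ guarantees.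
def pvGetKey (r : List (String × String)) (k : String) : String :=
  ((PySem.Dict.mk r).get? k).getD ""

-- ===== PORT A =====
def choose_best_records (records : List (List (String × String))) : List (List (String × String)) :=
  let grouped := records.foldl
    (fun d r => d.modify (pvGetKey r "orig_source") [] (· ++ [r]))
    PySem.Dict.empty
  grouped.items.foldl
    (fun acc p =>
      let pairs := p.2.map (fun r => (PySem.Str.count (pvGetKey r "target") "extra_id", r))
      match PySem.List.min? pairs (fun x => x.1) with
      | some best => acc ++ [best.2]
      | none => acc)    -- unreachable: every group is nonempty
    []

-- ===== PORT B =====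
def choose_best_records_alt (records : List (List (String × String))) : List (List (String × String)) :=
  let best := records.foldl
    (fun d r =>
      let c := PySem.Str.count (pvGetKey r "target") "extra_id"
      let src := pvGetKey r "orig_source"
      match d.get? src with
      | none => d.insert src (c, r)
      | some cur => if c < cur.1 then d.insert src (c, r) else d)
    PySem.Dict.empty
  best.values.map (fun p => p.2)

-- ===== PRECONDITION & SPEC =====
-- A (and B) raise KeyError on a record lacking the key "orig_source" or "target"; Pre_ excludes exactly those.
def Pre_choose_best_records (records : List (List (String × String))) : Prop :=
  ∀ r ∈ records, (∃ p ∈ r, p.1 = "orig_source") ∧ (∃ p ∈ r, p.1 = "target")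
instance (records : List (List (String × String))) : Decidable (Pre_choose_best_records records) := by
  unfold Pre_choose_best_records; infer_instance

def pvWitness_choose_best_records : (List (List (String × String))) :=
  [[("orig_source", "a"), ("target", "x extra_id y")], [("orig_source", "a"), ("target", "x")]]

def Spec_choose_best_records (records : List (List (String × String))) (out : List (List (String × String))) : Prop := out = choose_best_records_alt records
instance (records : List (List (String × String))) (out : List (List (String × String))) : Decidable (Spec_choose_best_records records out) := by unfold Spec_choose_best_records; infer_instance

-- ===== CLAIM (what is proved, stated in full; the proofs are below) =====
def Claim_equal_choose_best_records : Prop := ∀ (records : List (List (String × String))), Dom_choose_best_records records → Pre_choose_best_records records → Spec_choose_best_records records (choose_best_records records)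

-- ===== LEMMAS AND PROOFS =====

-- the two per-record projections
def pvCnt (r : List (String × String)) : Nat :=
  PySem.Str.count (pvGetKey r "target") "extra_id"

-- Python min(…, key=lambda x: x[0]) over a group's (count, record) pairs, as A computes it
def pvMins (rs : List (List (String × String))) : Option (Nat × List (String × String)) :=
  PySem.List.min? (rs.map (fun r => (pvCnt r, r))) (fun x => x.1)

def pvH (rs : List (List (String × String))) : Nat × List (String × String) :=
  (pvMins rs).getD (0, [])

-- the two loop bodies
def pvStepA (d : PySem.Dict String (List (List (String × String)))) (r : List (String × String)) :
    PySem.Dict String (List (List (String × String))) :=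
  d.modify (pvGetKey r "orig_source") [] (· ++ [r])

def pvStepB (d : PySem.Dict String (Nat × List (String × String))) (r : List (String × String)) :
    PySem.Dict String (Nat × List (String × String)) :=
  let c := PySem.Str.count (pvGetKey r "target") "extra_id"
  let src := pvGetKey r "orig_source"
  match d.get? src with
  | none => d.insert src (c, r)
  | some cur => if c < cur.1 then d.insert src (c, r) else d

-- invariant tying B's dict to A's dict
def pvRel (dA : PySem.Dict String (List (List (String × String))))
    (dB : PySem.Dict String (Nat × List (String × String))) : Prop :=
  dA.keys.Nodup ∧ (∀ p ∈ dA.items, p.2 ≠ []) ∧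
    dB.items = dA.items.map (fun p => (p.1, pvH p.2))

theorem pvMins_append_singleton (rs : List (List (String × String))) (r : List (String × String)) :
    pvMins (rs ++ [r]) =
      match pvMins rs with
      | none => some (pvCnt r, r)
      | some m => if pvCnt r < m.1 then some (pvCnt r, r) else some m := by
  simp only [pvMins, List.map_append, PySem.List.min?, List.foldl_append, List.foldl_cons,
    List.foldl_nil, List.map_cons, List.map_nil]
  split <;> simp [*]

theorem pvRel_step (dA : PySem.Dict String (List (List (String × String))))
    (dB : PySem.Dict String (Nat × List (String × String)))
    (r : List (String × String)) (h : pvRel dA dB) : pvRel (pvStepA dA r) (pvStepB dB r) := by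
  obtain ⟨hnd, hne, hmap⟩ := h
  have hget : ∀ k, dB.get? k = (dA.get? k).map pvH := by
    intro k
    simp [PySem.Dict.get?, hmap, List.find?_map, Function.comp_def]
  have hBstep : pvStepB dB r =
      match dB.get? (pvGetKey r "orig_source") with
      | none => dB.insert (pvGetKey r "orig_source") (pvCnt r, r)
      | some cur =>
          if pvCnt r < cur.1 then dB.insert (pvGetKey r "orig_source") (pvCnt r, r) else dB := rfl
  cases hA : dA.get? (pvGetKey r "orig_source") with
  | none =>
    have hcontA : dA.contains (pvGetKey r "orig_source") = false := by
      rw [PySem.Dict.contains_eq_isSome_get?, hA]; rfl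
    have hcontB : dB.contains (pvGetKey r "orig_source") = false := by
      rw [PySem.Dict.contains_eq_isSome_get?, hget, hA]; rfl
    have hgetD : dA.getD (pvGetKey r "orig_source") [] = [] := by
      rw [PySem.Dict.getD_eq_get?_getD, hA]; rfl
    have hAit : (pvStepA dA r).items = dA.items ++ [(pvGetKey r "orig_source", [r])] := by
      simp only [pvStepA, PySem.Dict.modify, PySem.Dict.insert, hcontA, hgetD,
        List.nil_append, Bool.false_eq_true, if_false]
    have hBit : (pvStepB dB r).items = dB.items ++ [(pvGetKey r "orig_source", (pvCnt r, r))] := by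
      rw [hBstep, hget, hA]
      simp only [Option.map_none, PySem.Dict.insert, hcontB, Bool.false_eq_true, if_false]
    refine ⟨?_, ?_, ?_⟩
    · have hkeys : (pvStepA dA r).keys = dA.keys ++ [pvGetKey r "orig_source"] := by
        simp [PySem.Dict.keys, hAit]
      rw [hkeys]
      have hknot : pvGetKey r "orig_source" ∉ dA.keys :=
        (PySem.Dict.get?_eq_none_iff_not_mem_keys _ _).1 hA
      simp [List.nodup_append, hnd]
      exact fun a ha hEq => hknot (hEq ▸ ha)
    · intro p hp
      rw [hAit] at hp
      rcases List.mem_append.1 hp with h1 | h1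
      · exact hne p h1
      · simp at h1; subst h1; simp
    · rw [hAit, hBit, hmap, List.map_append]
      simp [pvH, pvMins, PySem.List.min?]
  | some rs =>
    have hcontA : dA.contains (pvGetKey r "orig_source") = true := by
      rw [PySem.Dict.contains_eq_isSome_get?, hA]; rfl
    have hcontB : dB.contains (pvGetKey r "orig_source") = true := by
      rw [PySem.Dict.contains_eq_isSome_get?, hget, hA]; rfl
    have hmemkrs : (pvGetKey r "orig_source", rs) ∈ dA.items :=
      PySem.Dict.mem_items_of_get?_eq_some _ hA
    have hrsne : rs ≠ [] := hne _ hmemkrs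
    obtain ⟨m, hm⟩ : ∃ m, pvMins rs = some m := by
      cases hmm : pvMins rs with
      | none =>
        exfalso
        have := (PySem.List.min?_eq_none_iff _ _).1 hmm
        simp at this
        exact hrsne this
      | some m => exact ⟨m, rfl⟩
    have hH : pvH rs = m := by simp [pvH, hm]
    have hgetD : dA.getD (pvGetKey r "orig_source") [] = rs := by
      rw [PySem.Dict.getD_eq_get?_getD, hA]; rfl
    have hAit : (pvStepA dA r).items = dA.items.map
        (fun p => if p.1 == pvGetKey r "orig_source" then (pvGetKey r "orig_source", rs ++ [r]) else p) := by
      simp only [pvStepA, PySem.Dict.modify, PySem.Dict.insert, hcontA, hgetD, if_true]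
    -- with Nodup keys, any item keyed by k carries exactly the group rs
    have huniq : ∀ p ∈ dA.items, p.1 = pvGetKey r "orig_source" → p.2 = rs := by
      intro p hp hpk
      have hmemp : (p.1, p.2) ∈ dA.items := by simpa using hp
      have := PySem.Dict.get?_of_mem_items _ hmemp hnd
      rw [hpk, hA] at this
      exact Option.some.inj this.symm
    have hkeysA : (pvStepA dA r).keys = dA.keys := by
      simp only [PySem.Dict.keys, hAit, List.map_map]
      apply List.map_congr_left
      intro p hp
      by_cases hpk : p.1 = pvGetKey r "orig_source"
      · simp [hpk]
      · simp [hpk]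
    have hne' : ∀ p ∈ (pvStepA dA r).items, p.2 ≠ [] := by
      intro p hp
      rw [hAit] at hp
      obtain ⟨q, hq, hqe⟩ := List.mem_map.1 hp
      by_cases hqk : q.1 = pvGetKey r "orig_source"
      · simp [hqk] at hqe; rw [← hqe]; simp
      · simp [hqk] at hqe; rw [← hqe]; exact hne q hq
    by_cases hlt : pvCnt r < m.1
    · have hBit : (pvStepB dB r).items = dB.items.map
          (fun p => if p.1 == pvGetKey r "orig_source" then (pvGetKey r "orig_source", (pvCnt r, r)) else p) := by
        rw [hBstep, hget, hA]
        simp only [Option.map_some, hH, if_pos hlt, PySem.Dict.insert, hcontB, if_true]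
      refine ⟨by rw [hkeysA]; exact hnd, hne', ?_⟩
      rw [hAit, hBit, hmap, List.map_map, List.map_map]
      apply List.map_congr_left
      intro p hp
      by_cases hpk : p.1 = pvGetKey r "orig_source"
      · have hprs := huniq p hp hpk
        simp [hpk, pvH, pvMins_append_singleton, hm, hlt]
      · simp [hpk]
    · have hBit : (pvStepB dB r).items = dB.items := by
        rw [hBstep, hget, hA]
        simp only [Option.map_some, hH, if_neg hlt]
      refine ⟨by rw [hkeysA]; exact hnd, hne', ?_⟩
      rw [hAit, hBit, hmap, List.map_map]
      apply List.map_congr_left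
      intro p hp
      by_cases hpk : p.1 = pvGetKey r "orig_source"
      · have hprs := huniq p hp hpk
        simp [hpk, hprs, pvH, pvMins_append_singleton, hm, hlt]
      · simp [hpk]

theorem pvRel_fold (l : List (List (String × String)))
    (dA : PySem.Dict String (List (List (String × String))))
    (dB : PySem.Dict String (Nat × List (String × String)))
    (h : pvRel dA dB) : pvRel (l.foldl pvStepA dA) (l.foldl pvStepB dB) := by
  induction l generalizing dA dB with
  | nil => exact h
  | cons r t ih => exact ih _ _ (pvRel_step dA dB r h)

theorem pvFoldA_eq_map (L : List (String × List (List (String × String))))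
    (acc : List (List (String × String)))
    (h : ∀ p ∈ L, p.2 ≠ []) :
    L.foldl (fun acc p =>
        let pairs := p.2.map (fun r => (PySem.Str.count (pvGetKey r "target") "extra_id", r))
        match PySem.List.min? pairs (fun x => x.1) with
        | some best => acc ++ [best.2]
        | none => acc) acc
      = acc ++ L.map (fun p => (pvH p.2).2) := by
  induction L generalizing acc with
  | nil => simp
  | cons p t ih =>
    obtain ⟨m, hm⟩ : ∃ m, pvMins p.2 = some m := by
      cases hmm : pvMins p.2 with
      | none =>
        exfalso
        have := (PySem.List.min?_eq_none_iff _ _).1 hmm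
        simp at this
        exact h p (by simp) this
      | some m => exact ⟨m, rfl⟩
    have hm' : PySem.List.min?
        (p.2.map (fun r => (PySem.Str.count (pvGetKey r "target") "extra_id", r)))
        (fun x => x.1) = some m := hm
    simp only [List.foldl_cons, List.map_cons, hm']
    rw [ih _ (fun q hq => h q (by simp [hq]))]
    simp [pvH, hm]

-- ===== VERDICT (by name: the statement is the Claim_ definition above) =====
theorem choose_best_records_spec : Claim_equal_choose_best_records := by
  intro records _ _
  unfold Spec_choose_best_records choose_best_records choose_best_records_alt
  have hrel : pvRel (records.foldl pvStepA PySem.Dict.empty)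
      (records.foldl pvStepB PySem.Dict.empty) :=
    pvRel_fold records _ _
      ⟨by simp [PySem.Dict.keys, PySem.Dict.empty], by simp [PySem.Dict.empty],
       by simp [PySem.Dict.empty]⟩
  obtain ⟨hnd, hne, hmap⟩ := hrel
  show (records.foldl pvStepA PySem.Dict.empty).items.foldl _ [] =
    ((records.foldl pvStepB PySem.Dict.empty).values).map _
  rw [pvFoldA_eq_map _ [] hne]
  simp [PySem.Dict.values, hmap, List.map_map, Function.comp_def]
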